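-- pv_equiv track=rewrite | github.com/zengzh72/CMVCG | dataset.py | get_position_segment_ids
-- ===== SOURCE A (Python) =====
-- def get_position_segment_ids(text, seg_min=1):
--     position_ids = [0]*len(text)
--     segment_ids =  [0]*len(text)
--
--     i = 1
--     pos = 1
--     segment = seg_min
--
--     while i < len(text) :
--         position_ids[i] = pos
--         segment_ids[i] = segment
--         pos += 1
--         i += 1
--     return position_ids,segment_ids
-- ===== SOURCE B (Python) =====
-- def get_position_segment_ids(text, seg_min=1):
--     # Build both lists back-to-front (indices n-1 down to 1), then append the
--     # special first cell (0,0) and reverse; no preallocated arrays, no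
--     # parallel pos counter.
--     position_ids = []
--     segment_ids = []
--     i = len(text) - 1
--     while i > 0:
--         position_ids.append(i)
--         segment_ids.append(seg_min)
--         i -= 1
--     if text:
--         position_ids.append(0)
--         segment_ids.append(0)
--     position_ids.reverse()
--     segment_ids.reverse()
--     return position_ids, segment_ids
-- ===== Notes on version B (the rewrite author's own statement) =====
-- stated objective: alternative
-- what changed: Builds both lists back-to-front by appending indices n-1 down to 1 and then the special first cell, finishing with a reverse, instead of A's forward fill of preallocated zero arrays with index/pos/segment counters.
import Mathlib
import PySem

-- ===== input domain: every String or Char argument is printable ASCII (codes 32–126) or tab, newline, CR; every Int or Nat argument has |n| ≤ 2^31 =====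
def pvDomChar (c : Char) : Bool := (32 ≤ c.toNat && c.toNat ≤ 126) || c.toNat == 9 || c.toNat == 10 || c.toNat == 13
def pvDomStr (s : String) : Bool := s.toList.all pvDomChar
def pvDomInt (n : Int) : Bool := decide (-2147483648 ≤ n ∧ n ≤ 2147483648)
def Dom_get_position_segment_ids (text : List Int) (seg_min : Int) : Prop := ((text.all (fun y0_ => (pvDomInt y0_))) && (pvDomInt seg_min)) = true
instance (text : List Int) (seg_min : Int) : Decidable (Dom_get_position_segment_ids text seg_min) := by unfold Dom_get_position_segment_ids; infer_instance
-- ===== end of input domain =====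

-- B builds both lists back-to-front (indices n-1 down to 1, then the first cell) and reverses,
-- instead of A's forward fill of preallocated zero arrays with index/pos/segment counters.

-- ===== PORT A =====
-- A's while loop; i is a nonnegative in-range index throughout, so List.set is exact for the assignment
def pvWhileA (pids sids : List Int) (i : Nat) (pos segment : Int) (n : Nat) : List Int × List Int :=
  if _h : i < n then
    pvWhileA (pids.set i pos) (sids.set i segment) (i + 1) (pos + 1) segment n
  else (pids, sids)
termination_by n - i

def get_position_segment_ids (text : List Int) (seg_min : Int) : List Int × List Int :=
  pvWhileA (List.replicate text.length 0) (List.replicate text.length 0) 1 1 seg_min text.length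

-- ===== PORT B =====
-- B's descending while loop: append i / seg_min while i > 0
def pvWhileB (pids sids : List Int) (i : Int) (seg_min : Int) : List Int × List Int :=
  if _h : 0 < i then
    pvWhileB (pids ++ [i]) (sids ++ [seg_min]) (i - 1) seg_min
  else (pids, sids)
termination_by i.toNat
decreasing_by omega

def get_position_segment_ids_alt (text : List Int) (seg_min : Int) : List Int × List Int :=
  let r := pvWhileB [] [] ((text.length : Int) - 1) seg_min
  let r2 := if text ≠ [] then (r.1 ++ [0], r.2 ++ [0]) else r
  (r2.1.reverse, r2.2.reverse)

-- ===== PRECONDITION & SPEC =====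
def Spec_get_position_segment_ids (text : List Int) (seg_min : Int) (out : List Int × List Int) : Prop := out = get_position_segment_ids_alt text seg_min
instance (text : List Int) (seg_min : Int) (out : List Int × List Int) : Decidable (Spec_get_position_segment_ids text seg_min out) := by unfold Spec_get_position_segment_ids; infer_instance

-- ===== CLAIM (what is proved, stated in full; the proofs are below) =====
def Claim_equal_get_position_segment_ids : Prop := ∀ (text : List Int) (seg_min : Int), Dom_get_position_segment_ids text seg_min → Spec_get_position_segment_ids text seg_min (get_position_segment_ids text seg_min)

-- ===== LEMMAS AND PROOFS =====

lemma take_succ_set (xs : List Int) (j : Nat) (v : Int) (h : j < xs.length) :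
    (xs.set j v).take (j + 1) = xs.take j ++ [v] := by
  apply List.ext_getElem
  · simp [List.length_take]; omega
  · intro i h1 h2
    simp only [List.length_take, List.length_set] at h1
    by_cases hij : i = j
    · subst hij
      simp [List.getElem_take, List.length_take]
    · have hi : i < j := by omega
      simp only [List.getElem_take, List.getElem_set, List.getElem_append, List.length_take]
      rw [if_neg (by omega)]
      rw [dif_pos (by omega)]

lemma pvWhileA_eq : ∀ (m n j : Nat), n - j = m → ∀ (pids sids : List Int) (pos seg : Int),
    pids.length = n → sids.length = n →
    pvWhileA pids sids j pos seg n =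
      (pids.take j ++ PySem.List.pyRange pos (pos + ((n : Int) - (j : Int))) 1,
       sids.take j ++ List.replicate (n - j) seg) := by
  intro m
  induction m with
  | zero =>
    intro n j hm pids sids pos seg hp hs
    rw [pvWhileA]
    have h : ¬ j < n := by omega
    simp only [h, dite_false]
    have hn : n - j = 0 := hm
    rw [PySem.List.pyRange_one_eq_nil (by
      have : (n : Int) ≤ (j : Int) := by exact_mod_cast (by omega : n ≤ j)
      omega)]
    rw [hn, List.take_of_length_le (by omega), List.take_of_length_le (by omega)]
    simp
  | succ m ih =>
    intro n j hm pids sids pos seg hp hs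
    rw [pvWhileA]
    have h : j < n := by omega
    simp only [h, dite_true]
    rw [ih n (j+1) (by omega) _ _ _ _ (by simp [hp]) (by simp [hs])]
    have h1 : (pids.set j pos).take (j+1) = pids.take j ++ [pos] :=
      take_succ_set pids j pos (by omega)
    have h2 : (sids.set j seg).take (j+1) = sids.take j ++ [seg] :=
      take_succ_set sids j seg (by omega)
    simp only [Prod.mk.injEq]
    constructor
    · rw [h1]
      have he : pos + 1 + ((n : Int) - ((j : Nat) + 1 : Nat)) = pos + ((n : Int) - (j : Int)) := by
        push_cast; ring
      rw [he, List.append_assoc]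
      have hc : PySem.List.pyRange pos (pos + ((n : Int) - (j : Int))) 1 =
          pos :: PySem.List.pyRange (pos + 1) (pos + ((n : Int) - (j : Int))) 1 :=
        PySem.List.pyRange_one_cons (by
          have : ((j : Int)) < (n : Int) := by exact_mod_cast h
          omega)
      rw [hc]
      simp
    · rw [h2]
      have hr : n - j = (n - (j+1)) + 1 := by omega
      rw [hr, List.replicate_succ]
      simp

-- B's descending loop appends the reversed range [k, k-1, …, 1] and k copies of seg
lemma pvWhileB_eq : ∀ (k : Nat) (pids sids : List Int) (seg : Int),
    pvWhileB pids sids (k : Int) seg =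
      (pids ++ (PySem.List.pyRange 1 ((k : Int) + 1) 1).reverse,
       sids ++ List.replicate k seg) := by
  intro k
  induction k with
  | zero =>
    intro pids sids seg
    rw [pvWhileB]
    simp
  | succ k ih =>
    intro pids sids seg
    rw [pvWhileB]
    have h : (0 : Int) < ((k : Nat) + 1 : Nat) := by exact_mod_cast Nat.succ_pos k
    simp only [h, dite_true]
    have hx : ((k + 1 : Nat) : Int) - 1 = (k : Int) := by push_cast; ring
    rw [hx, ih]
    simp only [Prod.mk.injEq]
    constructor
    · have hs : PySem.List.pyRange 1 (((k + 1 : Nat) : Int) + 1) 1 =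
          PySem.List.pyRange 1 ((k : Int) + 1) 1 ++ [(k : Int) + 1] := by
        have := PySem.List.pyRange_one_succ_right (a := 1) (b := (k : Int) + 1) (by omega)
        rw [show ((k + 1 : Nat) : Int) + 1 = ((k : Int) + 1) + 1 by push_cast; ring]
        exact this
      rw [hs]
      simp [List.append_assoc]
    · rw [List.replicate_succ]
      simp

-- ===== VERDICT (by name: the statement is the Claim_ definition above) =====
theorem get_position_segment_ids_spec : Claim_equal_get_position_segment_ids := by
  intro text seg_min _
  unfold Spec_get_position_segment_ids
  cases text with
  | nil =>
    rw [get_position_segment_ids, get_position_segment_ids_alt, pvWhileA, pvWhileB]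
    simp
  | cons x xs =>
    rw [get_position_segment_ids, get_position_segment_ids_alt]
    simp only [List.length_cons]
    rw [pvWhileA_eq xs.length (xs.length + 1) 1 (by omega) _ _ _ _ (by simp) (by simp)]
    have hx : ((xs.length + 1 : Nat) : Int) - 1 = (xs.length : Int) := by push_cast; ring
    rw [hx, pvWhileB_eq xs.length [] [] seg_min]
    have he : (1 : Int) + (((xs.length + 1 : Nat) : Int) - ((1 : Nat) : Int)) =
        (xs.length : Int) + 1 := by push_cast; ring
    rw [he]
    simp [List.replicate_succ]
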